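-- pv_equiv track=rewrite | github.com/lezhang7/colxlip | src/flair/inference_data.py | extract_unique_img_list_from_data_list
-- ===== SOURCE A (Python) =====
-- def extract_unique_img_list_from_data_list(data_list):
--     """
--     :param data_list: a list of dicts, each: {'image', 'image_id', 'caption', 'caption_id'}
--     :return: img_list: a list of dicts, with all unique 'image' w.r.t. 'image_id'. So each new dict will be {'image', 'image_id'}
--     """
--     seen_ids = set()
--     img_list = []
--
--     for item in data_list:
--         image_id = item['image_id']
--         if image_id not in seen_ids:
--             # Add to the list and mark the id as seen
--             img_list.append({'image': item['image'], 'image_id': image_id})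
--             seen_ids.add(image_id)
--
--     return img_list
-- ===== SOURCE B (Python) =====
-- def extract_unique_img_list_from_data_list(data_list):
--     if not data_list:
--         return []
--     head, tail = data_list[0], data_list[1:]
--     k = head['image_id']
--     return [{'image': head['image'], 'image_id': k}] + \
--         extract_unique_img_list_from_data_list(
--             [it for it in tail if it['image_id'] != k])
-- ===== Notes on version B (the rewrite author's own statement) =====
-- stated objective: alternative
-- what changed: Replaces the single-pass seen-set loop with a recursive sieve: keep the head, filter every later item with the head's image_id out of the tail, recurse on the filtered tail; no seen-set, dict or membership branch.
import Mathlib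
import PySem

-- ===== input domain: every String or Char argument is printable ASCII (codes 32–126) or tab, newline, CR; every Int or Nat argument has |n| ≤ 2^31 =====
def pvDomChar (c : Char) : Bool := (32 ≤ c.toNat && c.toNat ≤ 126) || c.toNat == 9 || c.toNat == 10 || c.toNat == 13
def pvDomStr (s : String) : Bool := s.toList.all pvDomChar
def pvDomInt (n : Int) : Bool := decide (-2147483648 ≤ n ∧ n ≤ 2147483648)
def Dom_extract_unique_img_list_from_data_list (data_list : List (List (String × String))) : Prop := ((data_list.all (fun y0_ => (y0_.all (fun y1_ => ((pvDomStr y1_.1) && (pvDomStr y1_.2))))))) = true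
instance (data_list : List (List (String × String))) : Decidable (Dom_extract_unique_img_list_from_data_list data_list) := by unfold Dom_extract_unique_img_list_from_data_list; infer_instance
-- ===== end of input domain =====

-- B deduplicates by a recursive sieve (keep the head, filter its image_id out of the tail, recurse)
-- instead of A's single pass with a seen-set; same return value, no mutation.

-- ===== PORT A =====
def extract_unique_img_list_from_data_list (data_list : List (List (String × String))) : List (List (String × String)) :=
  (data_list.foldl
    (fun (st : PySem.Set String × List (List (String × String))) item =>
      let image_id := (PySem.Dict.mk item).getD "image_id" ""
      if PySem.Set.contains st.1 image_id then st
      else (PySem.Set.add st.1 image_id,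
            st.2 ++ [[("image", (PySem.Dict.mk item).getD "image" ""), ("image_id", image_id)]]))
    (PySem.Set.empty, [])).2

-- ===== PORT B =====
def extract_unique_img_list_from_data_list_alt : List (List (String × String)) → List (List (String × String))
  | [] => []
  | head :: tail =>
    let k := (PySem.Dict.mk head).getD "image_id" ""
    [("image", (PySem.Dict.mk head).getD "image" ""), ("image_id", k)] ::
      extract_unique_img_list_from_data_list_alt
        (tail.filter (fun it => (PySem.Dict.mk it).getD "image_id" "" != k))
termination_by l => l.length
decreasing_by simpa using Nat.lt_succ_of_le (List.length_filter_le _ tail)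

-- ===== PRECONDITION & SPEC =====
-- Python item['image_id'] (first match in the association list); used only by Pre_ below.
def pvIdOf (item : List (String × String)) : String := (PySem.Dict.mk item).getD "image_id" ""

-- Pre_ excludes exactly the inputs where Python A raises KeyError: an item missing the key
-- "image_id", or a FIRST-occurrence item (its image_id not among the earlier ones) missing "image".
-- B raises KeyError on exactly the same inputs, so nothing on which A returns is excluded.
def Pre_extract_unique_img_list_from_data_list (data_list : List (List (String × String))) : Prop :=
  ∀ p ∈ PySem.List.enumerate data_list 0,
    "image_id" ∈ p.2.map Prod.fst ∧
      (((data_list.take p.1.toNat).map pvIdOf).contains (pvIdOf p.2) = true ∨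
        "image" ∈ p.2.map Prod.fst)
instance (data_list : List (List (String × String))) : Decidable (Pre_extract_unique_img_list_from_data_list data_list) := by unfold Pre_extract_unique_img_list_from_data_list; infer_instance

def pvWitness_extract_unique_img_list_from_data_list : (List (List (String × String))) :=
  [[("image", "a.jpg"), ("image_id", "1")], [("image", "b.jpg"), ("image_id", "1")]]

def Spec_extract_unique_img_list_from_data_list (data_list : List (List (String × String))) (out : List (List (String × String))) : Prop := out = extract_unique_img_list_from_data_list_alt data_list
instance (data_list : List (List (String × String))) (out : List (List (String × String))) : Decidable (Spec_extract_unique_img_list_from_data_list data_list out) := by unfold Spec_extract_unique_img_list_from_data_list; infer_instance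

-- ===== CLAIM (what is proved, stated in full; the proofs are below) =====
def Claim_equal_extract_unique_img_list_from_data_list : Prop := ∀ (data_list : List (List (String × String))), Dom_extract_unique_img_list_from_data_list data_list → Pre_extract_unique_img_list_from_data_list data_list → Spec_extract_unique_img_list_from_data_list data_list (extract_unique_img_list_from_data_list data_list)

-- ===== LEMMAS AND PROOFS =====

-- the record A appends for an item
def euilRec (item : List (String × String)) : List (String × String) :=
  [("image", (PySem.Dict.mk item).getD "image" ""),
   ("image_id", (PySem.Dict.mk item).getD "image_id" "")]

-- A's loop, with the seen-set made an explicit parameter and the output produced directly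
def euilF (s : PySem.Set String) : List (List (String × String)) → List (List (String × String))
  | [] => []
  | h :: t =>
    let k := (PySem.Dict.mk h).getD "image_id" ""
    if PySem.Set.contains s k then euilF s t
    else euilRec h :: euilF (PySem.Set.add s k) t

lemma euil_fold (l : List (List (String × String))) (s : PySem.Set String)
    (acc : List (List (String × String))) :
    (l.foldl
      (fun (st : PySem.Set String × List (List (String × String))) item =>
        let image_id := (PySem.Dict.mk item).getD "image_id" ""
        if PySem.Set.contains st.1 image_id then st
        else (PySem.Set.add st.1 image_id,
              st.2 ++ [[("image", (PySem.Dict.mk item).getD "image" ""), ("image_id", image_id)]]))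
      (s, acc)).2 = acc ++ euilF s l := by
  induction l generalizing s acc with
  | nil => simp [euilF]
  | cons h t ih =>
    simp only [List.foldl_cons, euilF]
    by_cases hc : PySem.Set.contains s ((PySem.Dict.mk h).getD "image_id" "") = true
    · simp only [hc, if_true]; exact ih s acc
    · simp only [Bool.not_eq_true] at hc
      simp only [hc, Bool.false_eq_true, if_false]
      rw [ih]
      simp [euilRec, List.append_assoc]

lemma euil_contains_add (s : PySem.Set String) (k x : String) :
    PySem.Set.contains (PySem.Set.add s k) x = (PySem.Set.contains s x || x == k) := by
  rw [Bool.eq_iff_iff]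
  simp [PySem.Set.mem_add]

lemma euil_sieve (t : List (List (String × String))) (s : PySem.Set String) :
    euilF s t
      = extract_unique_img_list_from_data_list_alt
          (t.filter (fun it => !PySem.Set.contains s ((PySem.Dict.mk it).getD "image_id" ""))) := by
  induction t generalizing s with
  | nil => simp [euilF, extract_unique_img_list_from_data_list_alt]
  | cons h t' ih =>
    by_cases hc : PySem.Set.contains s ((PySem.Dict.mk h).getD "image_id" "") = true
    · simp only [euilF, hc, if_true, List.filter_cons, Bool.not_true]
      rw [ih s]
      simp
    · simp only [Bool.not_eq_true] at hc
      have hm : ((PySem.Dict.mk h).getD "image_id" "") ∉ s := by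
        intro hmem
        rw [(PySem.Set.contains_iff s _).mpr hmem] at hc
        exact Bool.noConfusion hc
      simp only [euilF, hc, Bool.false_eq_true, if_false]
      rw [ih, List.filter_cons_of_pos (by simp [hm]),
        extract_unique_img_list_from_data_list_alt]
      congr 1
      rw [List.filter_filter]
      congr 1
      apply List.filter_congr
      intro it _
      rw [euil_contains_add]
      cases hx : PySem.Set.contains s ((PySem.Dict.mk it).getD "image_id" "") <;>
        cases he : ((PySem.Dict.mk it).getD "image_id" ""
            == (PySem.Dict.mk h).getD "image_id" "") <;>
          simp [he, bne]

-- ===== VERDICT (by name: the statement is the Claim_ definition above) =====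
theorem extract_unique_img_list_from_data_list_spec : Claim_equal_extract_unique_img_list_from_data_list := by
  intro data_list _ _
  unfold Spec_extract_unique_img_list_from_data_list extract_unique_img_list_from_data_list
  rw [euil_fold data_list PySem.Set.empty []]
  rw [euil_sieve data_list PySem.Set.empty]
  simp [PySem.Set.empty, PySem.Set.contains]
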